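-- pv_equiv track=rewrite | github.com/mayankpoddar/leetcodeProblems | 2120-execution-of-all-suffix-instructions-staying-in-a-grid/2120-execution-of-all-suffix-instructions-staying-in-a-grid.py | executeInstructions
-- ===== SOURCE A (Python) =====
-- from typing import List
--
-- def executeInstructions(n: int, startPos: List[int], s: str) -> List[int]:
--     m = len(s)
--     results = [0]*m
--     for i in range(m):
--         currentPos = startPos[:]
--         steps = 0
--         for j in range(i, m):
--             steps += 1
--             if s[j] == "L" and currentPos[1] > 0:
--                 currentPos[1] -= 1
--             elif s[j] == "R" and currentPos[1] < n-1:
--                 currentPos[1] += 1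
--             elif s[j] == "U" and currentPos[0] > 0:
--                 currentPos[0] -= 1
--             elif s[j] == "D" and currentPos[0] < n-1:
--                 currentPos[0] += 1
--             else:
--                 steps -= 1
--                 break
--         results[i] = steps
--     return results
-- ===== SOURCE B (Python) =====
-- from typing import List
--
-- def _push(st, i, v):
--     # keep only candidates that can still be an "earliest index with value <= key" answer:
--     # a new, earlier element with value <= an old one dominates it.  Afterwards the list is
--     # strictly increasing in value and strictly decreasing in index (end = most recent).
--     while st and st[-1][1] >= v:
--         st.pop()
--     st.append((i, v))
--
-- def _query(st, key):
--     # earliest index whose value is <= key, or None: binary search for the last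
--     # list position whose value is <= key (values ascend, indices descend).
--     lo, hi = 0, len(st)
--     while lo < hi:
--         mid = (lo + hi) // 2
--         if st[mid][1] <= key:
--             lo = mid + 1
--         else:
--             hi = mid
--     return st[lo - 1][0] if lo > 0 else None
--
-- def executeInstructions(n: int, startPos: List[int], s: str) -> List[int]:
--     m = len(s)
--     r0, c0 = startPos[0], startPos[1]
--     # cumulative (row, col) displacement BEFORE each instruction, as if every move executes
--     ann = []
--     dr = dc = 0
--     for ch in s:
--         ann.append((ch, dr, dc))
--         if ch == 'L': dc -= 1
--         elif ch == 'R': dc += 1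
--         elif ch == 'U': dr -= 1
--         elif ch == 'D': dr += 1
--     res = [0] * m
--     stL, stR, stU, stD = [], [], [], []   # candidate stacks (>=-boundaries store negated values)
--     bad = m                               # nearest non-LRUD instruction to the right
--     for i in range(m - 1, -1, -1):
--         ch, dr, dc = ann[i]
--         if ch == 'L':   _push(stL, i, dc)
--         elif ch == 'R': _push(stR, i, -dc)
--         elif ch == 'U': _push(stU, i, dr)
--         elif ch == 'D': _push(stD, i, -dr)
--         else:           bad = i
--         # first j >= i whose move is blocked: the robot's col before step j is
--         # c0 + dc_j - dc_i, so an 'L' at j is blocked iff dc_j <= dc_i - c0, etc.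
--         j = bad
--         for st, key in ((stL, dc - c0), (stR, -(dc + (n - 1 - c0))),
--                         (stU, dr - r0), (stD, -(dr + (n - 1 - r0)))):
--             q = _query(st, key)
--             if q is not None and q < j:
--                 j = q
--         res[i] = j - i
--     return res
-- ===== Notes on version B (the rewrite author's own statement) =====
-- stated objective: faster
-- what changed: A simulates every suffix from scratch (quadratic); B makes one right-to-left sweep over precomputed cumulative displacements, keeping per-direction monotonic candidate stacks queried by binary search for the first boundary-blocked instruction.
-- outside the precondition, e.g. on executeInstructions(1, [], ''): A returns [], B raises IndexError; on executeInstructions(1, [5], 'x'): A returns [0], B raises IndexError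
import Mathlib
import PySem

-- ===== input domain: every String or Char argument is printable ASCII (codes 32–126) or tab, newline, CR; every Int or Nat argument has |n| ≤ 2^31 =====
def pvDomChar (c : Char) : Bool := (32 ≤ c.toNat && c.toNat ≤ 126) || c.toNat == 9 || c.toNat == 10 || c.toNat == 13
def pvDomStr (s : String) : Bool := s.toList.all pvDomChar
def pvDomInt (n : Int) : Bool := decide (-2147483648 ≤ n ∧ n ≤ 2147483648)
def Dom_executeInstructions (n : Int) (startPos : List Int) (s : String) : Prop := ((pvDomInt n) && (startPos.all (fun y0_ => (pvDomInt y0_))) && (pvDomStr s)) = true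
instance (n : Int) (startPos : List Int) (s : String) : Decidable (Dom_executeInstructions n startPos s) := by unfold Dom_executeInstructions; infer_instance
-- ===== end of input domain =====

-- B replaces A's per-suffix simulation (quadratic) by one right-to-left sweep over cumulative
-- displacements with monotonic candidate stacks + binary search; measured faster at large sizes.

-- ===== PORT A =====
def pvAInner (n : Int) (pos : Int × Int) (steps : Int) : List Char → Int
  | [] => steps
  | c :: rest =>
    let steps1 := steps + 1
    if c = 'L' ∧ pos.2 > 0 then pvAInner n (pos.1, pos.2 - 1) steps1 rest
    else if c = 'R' ∧ pos.2 < n - 1 then pvAInner n (pos.1, pos.2 + 1) steps1 rest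
    else if c = 'U' ∧ pos.1 > 0 then pvAInner n (pos.1 - 1, pos.2) steps1 rest
    else if c = 'D' ∧ pos.1 < n - 1 then pvAInner n (pos.1 + 1, pos.2) steps1 rest
    else steps1 - 1

def executeInstructions (n : Int) (startPos : List Int) (s : String) : List Int :=
  let cs := s.toList
  let r0 := (PySem.List.pyGet? startPos 0).getD 0
  let c0 := (PySem.List.pyGet? startPos 1).getD 0
  (List.range cs.length).map (fun i => pvAInner n (r0, c0) 0 (cs.drop i))

-- ===== PORT B =====
-- (row, col) displacement of one instruction character (0 for a non-move)
def pvDelta (ch : Char) : Int × Int :=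
  if ch = 'L' then (0, -1) else if ch = 'R' then (0, 1)
  else if ch = 'U' then (-1, 0) else if ch = 'D' then (1, 0) else (0, 0)

-- Source B's first loop: each char paired with the cumulative displacement before it
def pvAnnotate (dr dc : Int) : List Char → List (Char × Int × Int)
  | [] => []
  | ch :: rest => (ch, dr, dc) :: pvAnnotate (dr + (pvDelta ch).1) (dc + (pvDelta ch).2) rest

-- Source B's _push; head of the Lean list = Python's end of list (the most recent element)
def pvPush (i : Nat) (v : Int) : List (Nat × Int) → List (Nat × Int)
  | [] => [(i, v)]
  | (j, w) :: rest => if v ≤ w then pvPush i v rest else (i, v) :: (j, w) :: rest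

-- st[p] in Source B's Python-order indexing (position 0 = bottom = Lean tail end)
def pvAt (st : List (Nat × Int)) (p : Nat) : Nat × Int := st.getD (st.length - 1 - p) (0, 0)

-- Source B's while-loop binary search inside _query
def pvBSearch (st : List (Nat × Int)) (key : Int) (lo hi : Nat) : Nat :=
  if _h : lo < hi then
    if (pvAt st ((lo + hi) / 2)).2 ≤ key then pvBSearch st key ((lo + hi) / 2 + 1) hi
    else pvBSearch st key lo ((lo + hi) / 2)
  else lo
termination_by hi - lo
decreasing_by all_goals omega

def pvQuery (st : List (Nat × Int)) (key : Int) : Option Nat :=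
  let lo := pvBSearch st key 0 st.length
  if lo > 0 then some (pvAt st (lo - 1)).1 else none

-- Source B's 'if q is not None and q < j: j = q'
def pvMinO (j : Nat) : Option Nat → Nat
  | some q => min j q
  | none => j

-- Source B's main right-to-left loop (the list is the reversed enumerated annotation)
def pvBLoop (n r0 c0 : Int) (stL stR stU stD : List (Nat × Int)) (bad : Nat) (acc : List Int) :
    List ((Char × Int × Int) × Nat) → List Int
  | [] => acc
  | ((ch, dr, dc), i) :: rest =>
    let stL' := if ch = 'L' then pvPush i dc stL else stL
    let stR' := if ch = 'R' then pvPush i (-dc) stR else stR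
    let stU' := if ch = 'U' then pvPush i dr stU else stU
    let stD' := if ch = 'D' then pvPush i (-dr) stD else stD
    let bad' := if ch = 'L' ∨ ch = 'R' ∨ ch = 'U' ∨ ch = 'D' then bad else i
    let j0 := bad'
    let j1 := pvMinO j0 (pvQuery stL' (dc - c0))
    let j2 := pvMinO j1 (pvQuery stR' (-(dc + (n - 1 - c0))))
    let j3 := pvMinO j2 (pvQuery stU' (dr - r0))
    let j4 := pvMinO j3 (pvQuery stD' (-(dr + (n - 1 - r0))))
    pvBLoop n r0 c0 stL' stR' stU' stD' bad' (((j4 : Int) - (i : Int)) :: acc) rest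

def executeInstructions_alt (n : Int) (startPos : List Int) (s : String) : List Int :=
  let cs := s.toList
  let r0 := (PySem.List.pyGet? startPos 0).getD 0
  let c0 := (PySem.List.pyGet? startPos 1).getD 0
  pvBLoop n r0 c0 [] [] [] [] cs.length [] ((pvAnnotate 0 0 cs).zipIdx.reverse)

-- ===== PRECONDITION & SPEC =====
-- Pre_ excludes startPos with fewer than two coordinates: B reads both coordinates up front and
-- raises IndexError there unconditionally, while A raises IndexError only once an L/R (resp., for
-- an empty list, any move) instruction is reached, and returns a value when none occurs in s.
def Pre_executeInstructions (n : Int) (startPos : List Int) (s : String) : Prop :=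
  2 ≤ startPos.length
instance (n : Int) (startPos : List Int) (s : String) : Decidable (Pre_executeInstructions n startPos s) := by unfold Pre_executeInstructions; infer_instance

def pvWitness_executeInstructions : Int × List Int × String := (2, [0, 1], "RDLU")

def Spec_executeInstructions (n : Int) (startPos : List Int) (s : String) (out : List Int) : Prop := out = executeInstructions_alt n startPos s
instance (n : Int) (startPos : List Int) (s : String) (out : List Int) : Decidable (Spec_executeInstructions n startPos s out) := by unfold Spec_executeInstructions; infer_instance

-- ===== CLAIM (what is proved, stated in full; the proofs are below) =====
def Claim_equal_executeInstructions : Prop := ∀ (n : Int) (startPos : List Int) (s : String), Dom_executeInstructions n startPos s → Pre_executeInstructions n startPos s → Spec_executeInstructions n startPos s (executeInstructions n startPos s)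

-- ===== LEMMAS AND PROOFS =====

-- blocked-test on an annotated char, relative to base position (rB, cB)
def pvBlk (n rB cB : Int) (x : Char × Int × Int) : Bool :=
  !((x.1 == 'L' && decide (cB + x.2.2 > 0)) || (x.1 == 'R' && decide (cB + x.2.2 < n - 1)) ||
    (x.1 == 'U' && decide (rB + x.2.1 > 0)) || (x.1 == 'D' && decide (rB + x.2.1 < n - 1)))

def pvOff (l : List Char) : Int × Int :=
  ((l.map fun c => (pvDelta c).1).sum, (l.map fun c => (pvDelta c).2).sum)

-- the common value both programs compute for suffix i
def pvF (n r0 c0 : Int) (cs : List Char) (i : Nat) : Nat :=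
  ((pvAnnotate 0 0 cs).drop i).findIdx
    (pvBlk n (r0 - (pvOff (cs.take i)).1) (c0 - (pvOff (cs.take i)).2))

def pvVal (c : Char) (x : Char × Int × Int) : Int :=
  if c = 'L' then x.2.2 else if c = 'R' then -x.2.2 else if c = 'U' then x.2.1 else -x.2.1

def pvIsMove (ch : Char) : Prop := ch = 'L' ∨ ch = 'R' ∨ ch = 'U' ∨ ch = 'D'

def pvStInv (ann : List (Char × Int × Int)) (c : Char) (k : Nat) (st : List (Nat × Int)) : Prop :=
  (∀ q ∈ st, k ≤ q.1 ∧ ∃ h : q.1 < ann.length, (ann[q.1]).1 = c ∧ q.2 = pvVal c ann[q.1]) ∧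
  st.Pairwise (fun a b => a.1 < b.1 ∧ b.2 < a.2) ∧
  (∀ j (hj : j < ann.length), k ≤ j → (ann[j]).1 = c → ∃ q ∈ st, q.1 ≤ j ∧ q.2 ≤ pvVal c ann[j])

def pvBadInv (ann : List (Char × Int × Int)) (k : Nat) (bad : Nat) : Prop :=
  k ≤ bad ∧ bad ≤ ann.length ∧
  (∀ j (hj : j < ann.length), k ≤ j → j < bad → pvIsMove (ann[j]).1) ∧
  (∀ h : bad < ann.length, ¬ pvIsMove (ann[bad]).1)

theorem pvAnnotate_length (dr dc : Int) (l : List Char) :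
    (pvAnnotate dr dc l).length = l.length := by
  induction l generalizing dr dc with
  | nil => rfl
  | cons ch rest ih => simp [pvAnnotate, ih]

theorem pvOff_nil : pvOff [] = (0, 0) := by simp [pvOff]

theorem pvOff_cons (c : Char) (t : List Char) :
    pvOff (c :: t) = ((pvDelta c).1 + (pvOff t).1, (pvDelta c).2 + (pvOff t).2) := by
  simp [pvOff]

theorem pvAnnotate_drop : ∀ (k : Nat) (l : List Char) (dr dc : Int),
    (pvAnnotate dr dc l).drop k
      = pvAnnotate (dr + (pvOff (l.take k)).1) (dc + (pvOff (l.take k)).2) (l.drop k) := by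
  intro k
  induction k with
  | zero => intro l dr dc; simp [pvOff_nil]
  | succ k ih =>
    intro l dr dc
    cases l with
    | nil => simp [pvAnnotate]
    | cons ch rest =>
      simp only [pvAnnotate, List.drop_succ_cons, List.take_succ_cons, pvOff_cons, ih]
      congr 1 <;> ring

theorem pvAnnotate_getElem (l : List Char) (dr dc : Int) (k : Nat) (h : k < l.length) :
    (pvAnnotate dr dc l)[k]'(by rw [pvAnnotate_length]; exact h)
      = (l[k], dr + (pvOff (l.take k)).1, dc + (pvOff (l.take k)).2) := by
  have h1 : (pvAnnotate dr dc l).drop k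
      = pvAnnotate (dr + (pvOff (l.take k)).1) (dc + (pvOff (l.take k)).2) (l.drop k) :=
    pvAnnotate_drop k l dr dc
  have h2 : l.drop k = l[k] :: l.drop (k + 1) := List.drop_eq_getElem_cons h
  have h3 : (pvAnnotate dr dc l).drop k
      = (pvAnnotate dr dc l)[k]'(by rw [pvAnnotate_length]; exact h)
        :: (pvAnnotate dr dc l).drop (k + 1) :=
    List.drop_eq_getElem_cons (by rw [pvAnnotate_length]; exact h)
  rw [h2] at h1
  simp only [pvAnnotate] at h1
  rw [h3] at h1
  exact (List.cons_eq_cons.mp h1).1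

theorem pvAInner_eq (n rB cB : Int) : ∀ (l : List Char) (dr dc steps : Int),
    pvAInner n (rB + dr, cB + dc) steps l
      = steps + ((pvAnnotate dr dc l).findIdx (pvBlk n rB cB) : Int) := by
  intro l
  induction l with
  | nil => intro dr dc steps; simp [pvAInner, pvAnnotate]
  | cons ch rest ih =>
    intro dr dc steps
    simp only [pvAInner, pvAnnotate, List.findIdx_cons]
    by_cases hL : ch = 'L' ∧ cB + dc > 0
    · obtain ⟨hc, hgt⟩ := hL
      subst hc
      rw [if_pos ⟨rfl, hgt⟩]
      have hb : pvBlk n rB cB ('L', dr, dc) = false := by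
        simp [pvBlk]; omega
      rw [hb]
      have hδ1 : (pvDelta 'L').1 = 0 := by decide
      have hδ2 : (pvDelta 'L').2 = -1 := by decide
      simp only [hδ1, hδ2, cond_false]
      have h := ih (dr + 0) (dc + -1) (steps + 1)
      have e1 : rB + (dr + 0) = rB + dr := by ring
      have e2 : cB + (dc + -1) = cB + dc - 1 := by ring
      rw [e1, e2] at h
      rw [h]; push_cast; ring
    · rw [if_neg hL]
      by_cases hR : ch = 'R' ∧ cB + dc < n - 1
      · obtain ⟨hc, hlt⟩ := hR
        subst hc
        rw [if_pos ⟨rfl, hlt⟩]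
        have hb : pvBlk n rB cB ('R', dr, dc) = false := by
          simp [pvBlk]; omega
        rw [hb]
        have hδ1 : (pvDelta 'R').1 = 0 := by decide
        have hδ2 : (pvDelta 'R').2 = 1 := by decide
        simp only [hδ1, hδ2, cond_false]
        have h := ih (dr + 0) (dc + 1) (steps + 1)
        have e1 : rB + (dr + 0) = rB + dr := by ring
        rw [e1] at h
        rw [show cB + dc + 1 = cB + (dc + 1) by ring, h]; push_cast; ring
      · rw [if_neg hR]
        by_cases hU : ch = 'U' ∧ rB + dr > 0
        · obtain ⟨hc, hgt⟩ := hU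
          subst hc
          rw [if_pos ⟨rfl, hgt⟩]
          have hb : pvBlk n rB cB ('U', dr, dc) = false := by
            simp [pvBlk]; omega
          rw [hb]
          have hδ1 : (pvDelta 'U').1 = -1 := by decide
          have hδ2 : (pvDelta 'U').2 = 0 := by decide
          simp only [hδ1, hδ2, cond_false]
          have h := ih (dr + -1) (dc + 0) (steps + 1)
          have e1 : cB + (dc + 0) = cB + dc := by ring
          have e2 : rB + (dr + -1) = rB + dr - 1 := by ring
          rw [e1, e2] at h
          rw [h]; push_cast; ring
        · rw [if_neg hU]
          by_cases hD : ch = 'D' ∧ rB + dr < n - 1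
          · obtain ⟨hc, hlt⟩ := hD
            subst hc
            rw [if_pos ⟨rfl, hlt⟩]
            have hb : pvBlk n rB cB ('D', dr, dc) = false := by
              simp [pvBlk]; omega
            rw [hb]
            have hδ1 : (pvDelta 'D').1 = 1 := by decide
            have hδ2 : (pvDelta 'D').2 = 0 := by decide
            simp only [hδ1, hδ2, cond_false]
            have h := ih (dr + 1) (dc + 0) (steps + 1)
            have e1 : cB + (dc + 0) = cB + dc := by ring
            rw [e1] at h
            rw [show rB + dr + 1 = rB + (dr + 1) by ring, h]; push_cast; ring
          · rw [if_neg hD]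
            have hb : pvBlk n rB cB (ch, dr, dc) = true := by
              by_cases e1 : ch = 'L'
              · subst e1
                have h1 : ¬ cB + dc > 0 := fun h => hL ⟨rfl, h⟩
                simp [pvBlk]; omega
              · by_cases e2 : ch = 'R'
                · subst e2
                  have h1 : ¬ cB + dc < n - 1 := fun h => hR ⟨rfl, h⟩
                  simp [pvBlk]; omega
                · by_cases e3 : ch = 'U'
                  · subst e3
                    have h1 : ¬ rB + dr > 0 := fun h => hU ⟨rfl, h⟩
                    simp [pvBlk]; omega
                  · by_cases e4 : ch = 'D'
                    · subst e4
                      have h1 : ¬ rB + dr < n - 1 := fun h => hD ⟨rfl, h⟩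
                      simp [pvBlk]; omega
                    · simp [pvBlk, e1, e2, e3, e4]
            rw [hb]
            simp

theorem pvFindIdx_eq_of {α : Type} (p : α → Bool) : ∀ (l : List α) (t : Nat), t ≤ l.length →
    (∀ u (hu : u < l.length), u < t → p l[u] = false) →
    (∀ h : t < l.length, p (l[t]) = true) →
    l.findIdx p = t := by
  intro l
  induction l with
  | nil => intro t ht _ _; simp at ht; simp [ht]
  | cons a rest ih =>
    intro t ht hlt hat
    cases t with
    | zero =>
      have := hat (by simpa using Nat.succ_pos rest.length)
      simp only [List.getElem_cons_zero] at this
      simp [List.findIdx_cons, this]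
    | succ t =>
      have ha : p a = false := by
        have := hlt 0 (by simp) (Nat.succ_pos t)
        simpa using this
      simp only [List.findIdx_cons, ha, cond_false]
      have : rest.findIdx p = t := by
        apply ih
        · simpa using ht
        · intro u hu hut
          have := hlt (u + 1) (by simpa using Nat.succ_lt_succ hu) (Nat.succ_lt_succ hut)
          simpa using this
        · intro h
          have := hat (by simpa using Nat.succ_lt_succ h)
          simpa using this
      omega

theorem pvPush_eq (i : Nat) (v : Int) : ∀ st : List (Nat × Int),
    pvPush i v st = (i, v) :: st.dropWhile (fun q => decide (v ≤ q.2)) := by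
  intro st
  induction st with
  | nil => simp [pvPush]
  | cons q rest ih =>
    obtain ⟨j, w⟩ := q
    by_cases h : v ≤ w
    · simp [pvPush, h, List.dropWhile, ih]
    · simp [pvPush, h, List.dropWhile]

theorem pvBSearch_inv (st : List (Nat × Int)) (key : Int)
    (mono : ∀ a b, a ≤ b → b < st.length → (pvAt st a).2 ≤ (pvAt st b).2) :
    ∀ (lo hi : Nat), lo ≤ hi → hi ≤ st.length →
    (∀ p, p < lo → (pvAt st p).2 ≤ key) →
    (∀ p, hi ≤ p → p < st.length → key < (pvAt st p).2) →
    pvBSearch st key lo hi ≤ st.length ∧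
    (∀ p, p < pvBSearch st key lo hi → (pvAt st p).2 ≤ key) ∧
    (∀ p, pvBSearch st key lo hi ≤ p → p < st.length → key < (pvAt st p).2) := by
  have main : ∀ (d lo hi : Nat), hi - lo = d → lo ≤ hi → hi ≤ st.length →
      (∀ p, p < lo → (pvAt st p).2 ≤ key) →
      (∀ p, hi ≤ p → p < st.length → key < (pvAt st p).2) →
      pvBSearch st key lo hi ≤ st.length ∧
      (∀ p, p < pvBSearch st key lo hi → (pvAt st p).2 ≤ key) ∧
      (∀ p, pvBSearch st key lo hi ≤ p → p < st.length → key < (pvAt st p).2) := by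
    intro d
    induction d using Nat.strong_induction_on with
    | _ d ih =>
      intro lo hi hd hle hlen hlo hhi
      rw [pvBSearch]
      by_cases h : lo < hi
      · rw [dif_pos h]
        have hm1 : lo ≤ (lo + hi) / 2 := by omega
        have hm2 : (lo + hi) / 2 < hi := by omega
        by_cases hc : (pvAt st ((lo + hi) / 2)).2 ≤ key
        · rw [if_pos hc]
          refine ih (hi - ((lo + hi) / 2 + 1)) (by omega) ((lo + hi) / 2 + 1) hi rfl
            (by omega) hlen ?_ hhi
          intro p hp
          exact le_trans (mono p ((lo + hi) / 2) (by omega) (by omega)) hc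
        · rw [if_neg hc]
          refine ih ((lo + hi) / 2 - lo) (by omega) lo ((lo + hi) / 2) rfl
            (by omega) (by omega) hlo ?_
          intro p hp hplen
          exact lt_of_not_ge fun hcon => hc (le_trans (mono ((lo + hi) / 2) p hp hplen) hcon)
      · rw [dif_neg h]
        have heq : lo = hi := by omega
        refine ⟨by omega, fun p hp => hlo p hp, fun p hp hplen => hhi p (by omega) hplen⟩
  intro lo hi hle hlen hlo hhi
  exact main (hi - lo) lo hi rfl hle hlen hlo hhi

theorem pvAt_eq (st : List (Nat × Int)) (p : Nat) (h : p < st.length) :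
    pvAt st p = st[st.length - 1 - p]'(by omega) := by
  simp [pvAt, List.getD_eq_getElem?_getD, List.getElem?_eq_getElem (show st.length - 1 - p < st.length by omega)]

theorem pvAt_mem (st : List (Nat × Int)) (p : Nat) (h : p < st.length) : pvAt st p ∈ st := by
  rw [pvAt_eq st p h]; exact List.getElem_mem _

theorem mem_pvAt (st : List (Nat × Int)) (q : Nat × Int) (h : q ∈ st) :
    ∃ p, ∃ hp : p < st.length, pvAt st p = q := by
  obtain ⟨i, hi, rfl⟩ := List.mem_iff_getElem.mp h
  refine ⟨st.length - 1 - i, by omega, ?_⟩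
  rw [pvAt_eq st _ (by omega)]
  congr 1
  omega

theorem pvAt_anti (st : List (Nat × Int))
    (hpw : st.Pairwise (fun a b => a.1 < b.1 ∧ b.2 < a.2)) (a b : Nat)
    (hab : a < b) (hb : b < st.length) :
    (pvAt st b).1 < (pvAt st a).1 ∧ (pvAt st a).2 < (pvAt st b).2 := by
  rw [pvAt_eq st a (by omega), pvAt_eq st b hb]
  exact (List.pairwise_iff_getElem.mp hpw) (st.length - 1 - b) (st.length - 1 - a)
    (by omega) (by omega) (by omega)

theorem pvAt_mono (st : List (Nat × Int))
    (hpw : st.Pairwise (fun a b => a.1 < b.1 ∧ b.2 < a.2)) (a b : Nat)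
    (hab : a ≤ b) (hb : b < st.length) : (pvAt st a).2 ≤ (pvAt st b).2 := by
  rcases Nat.lt_or_ge a b with h | h
  · exact le_of_lt (pvAt_anti st hpw a b h hb).2
  · have : a = b := by omega
    subst this; exact le_refl _

theorem pvQuery_spec (ann : List (Char × Int × Int)) (c : Char) (k : Nat)
    (st : List (Nat × Int)) (key : Int) (h : pvStInv ann c k st) :
    (∀ q, pvQuery st key = some q → ∃ hq : q < ann.length, k ≤ q ∧ (ann[q]).1 = c ∧
        pvVal c ann[q] ≤ key ∧
        ∀ j (hj : j < ann.length), k ≤ j → (ann[j]).1 = c → pvVal c ann[j] ≤ key → q ≤ j) ∧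
    (pvQuery st key = none →
        ∀ j (hj : j < ann.length), k ≤ j → (ann[j]).1 = c → ¬ pvVal c ann[j] ≤ key) := by
  obtain ⟨hmem, hpw, hdom⟩ := h
  obtain ⟨hr1, hr2, hr3⟩ := pvBSearch_inv st key (pvAt_mono st hpw) 0 st.length
    (Nat.zero_le _) (le_refl _) (fun p hp => absurd hp (Nat.not_lt_zero p))
    (fun p hp hplen => absurd hplen (by omega))
  constructor
  · intro q hq
    simp only [pvQuery] at hq
    by_cases hpos : pvBSearch st key 0 st.length > 0
    · rw [if_pos hpos] at hq
      have hlt : pvBSearch st key 0 st.length - 1 < st.length := by omega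
      have hmem1 := pvAt_mem st _ hlt
      obtain ⟨hk1, hq1, hcls, hval⟩ := hmem _ hmem1
      have hvk : (pvAt st (pvBSearch st key 0 st.length - 1)).2 ≤ key := hr2 _ (by omega)
      obtain rfl : (pvAt st (pvBSearch st key 0 st.length - 1)).1 = q := by
        injection hq
      refine ⟨hq1, hk1, hcls, by rw [← hval]; exact hvk, ?_⟩
      intro j hj hkj hcj hvj
      obtain ⟨q2, hq2mem, hq2le, hq2val⟩ := hdom j hj hkj hcj
      obtain ⟨p2, hp2, hp2eq⟩ := mem_pvAt st q2 hq2mem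
      have hp2r : p2 < pvBSearch st key 0 st.length := by
        by_contra hcon
        have := hr3 p2 (by omega) hp2
        rw [hp2eq] at this
        omega
      rcases Nat.lt_or_ge p2 (pvBSearch st key 0 st.length - 1) with hc2 | hc2
      · have := (pvAt_anti st hpw p2 _ hc2 hlt).1
        rw [hp2eq] at this
        omega
      · have : p2 = pvBSearch st key 0 st.length - 1 := by omega
        subst this
        rw [hp2eq]
        omega
    · rw [if_neg hpos] at hq
      exact absurd hq (by simp)
  · intro hnone j hj hkj hcj hvj
    simp only [pvQuery] at hnone
    by_cases hpos : pvBSearch st key 0 st.length > 0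
    · rw [if_pos hpos] at hnone; exact absurd hnone (by simp)
    · obtain ⟨q2, hq2mem, hq2le, hq2val⟩ := hdom j hj hkj hcj
      obtain ⟨p2, hp2, hp2eq⟩ := mem_pvAt st q2 hq2mem
      have := hr3 p2 (by omega) hp2
      rw [hp2eq] at this
      omega

theorem pvDropWhile_head_false {α : Type} (p : α → Bool) :
    ∀ (l : List α) (hd : α) (tl : List α), l.dropWhile p = hd :: tl → p hd = false := by
  intro l
  induction l with
  | nil => intro hd tl h; simp [List.dropWhile] at h
  | cons a r ih =>
    intro hd tl h
    by_cases hp : p a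
    · rw [List.dropWhile_cons_of_pos hp] at h
      exact ih hd tl h
    · rw [List.dropWhile_cons_of_neg hp] at h
      obtain ⟨rfl, _⟩ := List.cons_eq_cons.mp h
      exact Bool.eq_false_iff.mpr hp

theorem pvPush_inv (ann : List (Char × Int × Int)) (c : Char) (k : Nat)
    (st : List (Nat × Int)) (h : pvStInv ann c (k + 1) st) (hk : k < ann.length)
    (hc : (ann[k]).1 = c) : pvStInv ann c k (pvPush k (pvVal c ann[k]) st) := by
  obtain ⟨hmem, hpw, hdom⟩ := h
  rw [pvPush_eq]
  set v := pvVal c ann[k] with hv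
  set dw := st.dropWhile (fun q => decide (v ≤ q.2)) with hdw
  have hdsub : dw.Sublist st := List.dropWhile_sublist _
  have hdmem : ∀ q ∈ dw, q ∈ st := fun q hq => hdsub.mem hq
  have hdpw : dw.Pairwise (fun a b => a.1 < b.1 ∧ b.2 < a.2) := hpw.sublist hdsub
  have hdlt : ∀ q ∈ dw, q.2 < v := by
    intro q hq
    cases he : dw with
    | nil => rw [he] at hq; exact absurd hq (List.not_mem_nil)
    | cons hd tl =>
      have hd1 : hd.2 < v := by
        have := pvDropWhile_head_false (fun q : Nat × Int => decide (v ≤ q.2)) st hd tl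
          (by rw [← hdw, he])
        simpa using this
      rw [he] at hq
      rcases List.mem_cons.mp hq with rfl | hq2
      · exact hd1
      · have := List.pairwise_cons.mp (by rw [he] at hdpw; exact hdpw)
        exact lt_trans (this.1 q hq2).2 hd1
  refine ⟨?_, ?_, ?_⟩
  · intro q hq
    rcases List.mem_cons.mp hq with rfl | hq2
    · exact ⟨le_refl k, hk, hc, hv⟩
    · obtain ⟨h1, h2⟩ := hmem q (hdmem q hq2)
      exact ⟨by omega, h2⟩
  · refine List.pairwise_cons.mpr ⟨?_, hdpw⟩
    intro b hb
    obtain ⟨h1, _⟩ := hmem b (hdmem b hb)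
    exact ⟨by omega, hdlt b hb⟩
  · intro j hj hkj hcj
    rcases Nat.eq_or_lt_of_le hkj with rfl | hlt
    · exact ⟨(k, v), List.mem_cons_self, le_refl k, by rw [hv]⟩
    · obtain ⟨q2, hq2mem, hq2le, hq2val⟩ := hdom j hj (by omega) hcj
      by_cases hcase : v ≤ q2.2
      · exact ⟨(k, v), List.mem_cons_self, by omega, le_trans hcase hq2val⟩
      · have hq2dw : q2 ∈ dw := by
          have hsplit : st.takeWhile (fun q => decide (v ≤ q.2)) ++ dw = st := by
            rw [hdw]; exact List.takeWhile_append_dropWhile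
          rcases List.mem_append.mp (by rw [hsplit]; exact hq2mem) with htk | hdk
          · have := List.mem_takeWhile_imp htk
            simp at this
            omega
          · exact hdk
        exact ⟨q2, List.mem_cons_of_mem _ hq2dw, hq2le, hq2val⟩

theorem pvSkip_inv (ann : List (Char × Int × Int)) (c : Char) (k : Nat)
    (st : List (Nat × Int)) (h : pvStInv ann c (k + 1) st)
    (hc : ∀ hk : k < ann.length, (ann[k]).1 ≠ c) : pvStInv ann c k st := by
  obtain ⟨hmem, hpw, hdom⟩ := h
  refine ⟨?_, hpw, ?_⟩
  · intro q hq
    obtain ⟨h1, h2⟩ := hmem q hq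
    exact ⟨by omega, h2⟩
  · intro j hj hkj hcj
    rcases Nat.eq_or_lt_of_le hkj with rfl | hlt
    · exact absurd hcj (hc hj)
    · exact hdom j hj (by omega) hcj

theorem pvMinO_le (j : Nat) (o : Option Nat) : pvMinO j o ≤ j := by
  cases o <;> simp [pvMinO]

theorem pvMinO_le_some (j q : Nat) (o : Option Nat) (h : o = some q) : pvMinO j o ≤ q := by
  subst h; simp [pvMinO]

theorem pvMinO_ge (j kk : Nat) (o : Option Nat) (hj : kk ≤ j)
    (ho : ∀ q, o = some q → kk ≤ q) : kk ≤ pvMinO j o := by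
  cases o with
  | none => simpa [pvMinO] using hj
  | some q => simp [pvMinO]; exact ⟨hj, ho q rfl⟩

theorem pvMinO_cases (j : Nat) (o : Option Nat) :
    pvMinO j o = j ∨ ∃ q, o = some q ∧ pvMinO j o = q := by
  cases o with
  | none => left; rfl
  | some q =>
    simp [pvMinO]
    rcases Nat.le_total j q with h | h
    · left; omega
    · right; omega

theorem pvBlk_L (n rB cB : Int) (x : Char × Int × Int) (h : x.1 = 'L') :
    pvBlk n rB cB x = !decide (cB + x.2.2 > 0) := by
  obtain ⟨c, a, b⟩ := x
  simp at h; subst h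
  simp [pvBlk]

theorem pvBlk_R (n rB cB : Int) (x : Char × Int × Int) (h : x.1 = 'R') :
    pvBlk n rB cB x = !decide (cB + x.2.2 < n - 1) := by
  obtain ⟨c, a, b⟩ := x
  simp at h; subst h
  simp [pvBlk]

theorem pvBlk_U (n rB cB : Int) (x : Char × Int × Int) (h : x.1 = 'U') :
    pvBlk n rB cB x = !decide (rB + x.2.1 > 0) := by
  obtain ⟨c, a, b⟩ := x
  simp at h; subst h
  simp [pvBlk]

theorem pvBlk_D (n rB cB : Int) (x : Char × Int × Int) (h : x.1 = 'D') :
    pvBlk n rB cB x = !decide (rB + x.2.1 < n - 1) := by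
  obtain ⟨c, a, b⟩ := x
  simp at h; subst h
  simp [pvBlk]

theorem pvBlk_other (n rB cB : Int) (x : Char × Int × Int) (h : ¬ pvIsMove x.1) :
    pvBlk n rB cB x = true := by
  obtain ⟨c, a, b⟩ := x
  simp [pvIsMove] at h
  obtain ⟨h1, h2, h3, h4⟩ := h
  simp [pvBlk, h1, h2, h3, h4]

theorem pvVal_L (x : Char × Int × Int) : pvVal 'L' x = x.2.2 := by simp [pvVal]
theorem pvVal_R (x : Char × Int × Int) : pvVal 'R' x = -x.2.2 := by simp [pvVal]
theorem pvVal_U (x : Char × Int × Int) : pvVal 'U' x = x.2.1 := by simp [pvVal]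
theorem pvVal_D (x : Char × Int × Int) : pvVal 'D' x = -x.2.1 := by simp [pvVal]

theorem pvStep_eq (n r0 c0 : Int) (ann : List (Char × Int × Int)) (k : Nat)
    (hk : k < ann.length) (dr dc : Int) (hdr : dr = (ann[k]).2.1) (hdc : dc = (ann[k]).2.2)
    (stL stR stU stD : List (Nat × Int)) (bad : Nat)
    (hL : pvStInv ann 'L' k stL) (hR : pvStInv ann 'R' k stR)
    (hU : pvStInv ann 'U' k stU) (hD : pvStInv ann 'D' k stD)
    (hB : pvBadInv ann k bad) :
    pvMinO (pvMinO (pvMinO (pvMinO bad (pvQuery stL (dc - c0)))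
        (pvQuery stR (-(dc + (n - 1 - c0))))) (pvQuery stU (dr - r0)))
        (pvQuery stD (-(dr + (n - 1 - r0))))
      = k + (ann.drop k).findIdx (pvBlk n (r0 - dr) (c0 - dc)) := by
  obtain ⟨hb1, hb2, hb3, hb4⟩ := hB
  obtain ⟨qLs, qLn⟩ := pvQuery_spec ann 'L' k stL (dc - c0) hL
  obtain ⟨qRs, qRn⟩ := pvQuery_spec ann 'R' k stR (-(dc + (n - 1 - c0))) hR
  obtain ⟨qUs, qUn⟩ := pvQuery_spec ann 'U' k stU (dr - r0) hU
  obtain ⟨qDs, qDn⟩ := pvQuery_spec ann 'D' k stD (-(dr + (n - 1 - r0))) hD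
  set oL := pvQuery stL (dc - c0) with hoL
  set oR := pvQuery stR (-(dc + (n - 1 - c0))) with hoR
  set oU := pvQuery stU (dr - r0) with hoU
  set oD := pvQuery stD (-(dr + (n - 1 - r0))) with hoD
  set j1 := pvMinO bad oL with hj1
  set j2 := pvMinO j1 oR with hj2
  set j3 := pvMinO j2 oU with hj3
  set j4 := pvMinO j3 oD with hj4
  have hj4j3 : j4 ≤ j3 := pvMinO_le _ _
  have hj3j2 : j3 ≤ j2 := pvMinO_le _ _
  have hj2j1 : j2 ≤ j1 := pvMinO_le _ _
  have hj1b : j1 ≤ bad := pvMinO_le _ _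
  have hkj4 : k ≤ j4 := by
    apply pvMinO_ge _ _ _ (pvMinO_ge _ _ _ (pvMinO_ge _ _ _ (pvMinO_ge _ _ _ hb1
      (fun q hq => (qLs q hq).2.1)) (fun q hq => (qRs q hq).2.1))
      (fun q hq => (qUs q hq).2.1)) (fun q hq => (qDs q hq).2.1)
  have hj4len : j4 ≤ ann.length := by omega
  have hlen : (ann.drop k).length = ann.length - k := List.length_drop
  apply Eq.symm
  have := pvFindIdx_eq_of (pvBlk n (r0 - dr) (c0 - dc)) (ann.drop k) (j4 - k)
    (by omega) ?_ ?_
  · omega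
  · -- all positions before j4 are not blocked
    intro u hu hut
    rw [hlen] at hu
    have hj : k + u < ann.length := by omega
    rw [List.getElem_drop]
    have hjlt : k + u < j4 := by omega
    by_cases hcL : (ann[k + u]).1 = 'L'
    · rw [pvBlk_L _ _ _ _ hcL]
      simp only [Bool.not_eq_false']
      apply decide_eq_true
      by_contra hcon
      have helig : pvVal 'L' ann[k + u] ≤ dc - c0 := by rw [pvVal_L]; omega
      cases hq : oL with
      | none => exact qLn hq (k + u) hj (by omega) hcL helig
      | some q =>
        have hmin := (qLs q hq).2.2.2.2 (k + u) hj (by omega) hcL helig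
        have : j1 ≤ q := pvMinO_le_some _ _ _ hq
        omega
    · by_cases hcR : (ann[k + u]).1 = 'R'
      · rw [pvBlk_R _ _ _ _ hcR]
        simp only [Bool.not_eq_false']
        apply decide_eq_true
        by_contra hcon
        have helig : pvVal 'R' ann[k + u] ≤ -(dc + (n - 1 - c0)) := by rw [pvVal_R]; omega
        cases hq : oR with
        | none => exact qRn hq (k + u) hj (by omega) hcR helig
        | some q =>
          have hmin := (qRs q hq).2.2.2.2 (k + u) hj (by omega) hcR helig
          have : j2 ≤ q := pvMinO_le_some _ _ _ hq
          omega
      · by_cases hcU : (ann[k + u]).1 = 'U'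
        · rw [pvBlk_U _ _ _ _ hcU]
          simp only [Bool.not_eq_false']
          apply decide_eq_true
          by_contra hcon
          have helig : pvVal 'U' ann[k + u] ≤ dr - r0 := by rw [pvVal_U]; omega
          cases hq : oU with
          | none => exact qUn hq (k + u) hj (by omega) hcU helig
          | some q =>
            have hmin := (qUs q hq).2.2.2.2 (k + u) hj (by omega) hcU helig
            have : j3 ≤ q := pvMinO_le_some _ _ _ hq
            omega
        · by_cases hcD : (ann[k + u]).1 = 'D'
          · rw [pvBlk_D _ _ _ _ hcD]
            simp only [Bool.not_eq_false']
            apply decide_eq_true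
            by_contra hcon
            have helig : pvVal 'D' ann[k + u] ≤ -(dr + (n - 1 - r0)) := by rw [pvVal_D]; omega
            cases hq : oD with
            | none => exact qDn hq (k + u) hj (by omega) hcD helig
            | some q =>
              have hmin := (qDs q hq).2.2.2.2 (k + u) hj (by omega) hcD helig
              have : j4 ≤ q := pvMinO_le_some _ _ _ hq
              omega
          · -- non-move char before bad: impossible
            exfalso
            have := hb3 (k + u) hj (by omega) (by omega)
            simp [pvIsMove, hcL, hcR, hcU, hcD] at this
  · -- position j4 (if < length) is blocked
    intro ht
    rw [hlen] at ht
    have hj4lt : j4 < ann.length := by omega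
    rw [List.getElem_drop]
    have hgoal : ∀ (jj : Nat) (hjj : jj < ann.length), jj = j4 →
        pvBlk n (r0 - dr) (c0 - dc) ann[jj] = true := by
      intro jj hjj hjeq
      have hcases : j4 = bad ∨ (∃ q, oL = some q ∧ j4 = q) ∨ (∃ q, oR = some q ∧ j4 = q) ∨
          (∃ q, oU = some q ∧ j4 = q) ∨ (∃ q, oD = some q ∧ j4 = q) := by
        rcases pvMinO_cases j3 oD with h4 | ⟨q, hq, h4⟩
        · have e4 : j4 = j3 := hj4.trans h4
          rcases pvMinO_cases j2 oU with h3 | ⟨q, hq, h3⟩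
          · have e3 : j3 = j2 := hj3.trans h3
            rcases pvMinO_cases j1 oR with h2 | ⟨q, hq, h2⟩
            · have e2 : j2 = j1 := hj2.trans h2
              rcases pvMinO_cases bad oL with h1 | ⟨q, hq, h1⟩
              · have e1 : j1 = bad := hj1.trans h1
                left; omega
              · right; left; exact ⟨q, hq, by have := hj1.trans h1; omega⟩
            · right; right; left; exact ⟨q, hq, by have := hj2.trans h2; omega⟩
          · right; right; right; left; exact ⟨q, hq, by have := hj3.trans h3; omega⟩
        · right; right; right; right; exact ⟨q, hq, hj4.trans h4⟩
      rcases hcases with hcase | ⟨q, hq, hcase⟩ | ⟨q, hq, hcase⟩ | ⟨q, hq, hcase⟩ | ⟨q, hq, hcase⟩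
      · have e : jj = bad := hjeq.trans hcase
        subst e
        exact pvBlk_other _ _ _ _ (hb4 hjj)
      · obtain ⟨hq1, hq2, hq3, hq4, _⟩ := qLs q hq
        have e : jj = q := hjeq.trans hcase
        subst e
        rw [pvBlk_L _ _ _ _ hq3]
        rw [pvVal_L] at hq4
        simp only [Bool.not_eq_true']
        apply decide_eq_false
        omega
      · obtain ⟨hq1, hq2, hq3, hq4, _⟩ := qRs q hq
        have e : jj = q := hjeq.trans hcase
        subst e
        rw [pvBlk_R _ _ _ _ hq3]
        rw [pvVal_R] at hq4
        simp only [Bool.not_eq_true']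
        apply decide_eq_false
        omega
      · obtain ⟨hq1, hq2, hq3, hq4, _⟩ := qUs q hq
        have e : jj = q := hjeq.trans hcase
        subst e
        rw [pvBlk_U _ _ _ _ hq3]
        rw [pvVal_U] at hq4
        simp only [Bool.not_eq_true']
        apply decide_eq_false
        omega
      · obtain ⟨hq1, hq2, hq3, hq4, _⟩ := qDs q hq
        have e : jj = q := hjeq.trans hcase
        subst e
        rw [pvBlk_D _ _ _ _ hq3]
        rw [pvVal_D] at hq4
        simp only [Bool.not_eq_true']
        apply decide_eq_false
        omega
    exact hgoal (k + (j4 - k)) (by omega) (by omega)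

theorem pvLoop_eq (n r0 c0 : Int) (cs : List Char) :
    ∀ (k : Nat) (stL stR stU stD : List (Nat × Int)) (bad : Nat) (acc : List Int),
    k ≤ cs.length →
    pvStInv (pvAnnotate 0 0 cs) 'L' k stL →
    pvStInv (pvAnnotate 0 0 cs) 'R' k stR →
    pvStInv (pvAnnotate 0 0 cs) 'U' k stU →
    pvStInv (pvAnnotate 0 0 cs) 'D' k stD →
    pvBadInv (pvAnnotate 0 0 cs) k bad →
    pvBLoop n r0 c0 stL stR stU stD bad acc (((pvAnnotate 0 0 cs).zipIdx.take k).reverse)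
      = (List.range k).map (fun i => (pvF n r0 c0 cs i : Int)) ++ acc := by
  intro k
  induction k with
  | zero => intro stL stR stU stD bad acc _ _ _ _ _ _; simp [pvBLoop]
  | succ k ih =>
    intro stL stR stU stD bad acc hk hL hR hU hD hB
    have hklt : k < cs.length := by omega
    have hlen : (pvAnnotate 0 0 cs).length = cs.length := pvAnnotate_length _ _ _
    have hka : k < (pvAnnotate 0 0 cs).length := by omega
    have hzlen : (pvAnnotate 0 0 cs).zipIdx.length = cs.length := by
      rw [List.length_zipIdx, hlen]
    have hak := pvAnnotate_getElem cs 0 0 k hklt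
    have htake : ((pvAnnotate 0 0 cs).zipIdx.take (k + 1)).reverse
        = ((cs[k], 0 + (pvOff (cs.take k)).1, 0 + (pvOff (cs.take k)).2), k)
          :: ((pvAnnotate 0 0 cs).zipIdx.take k).reverse := by
      rw [List.take_succ, List.getElem?_eq_getElem (by omega)]
      simp only [List.reverse_append, List.reverse_cons, List.reverse_nil, List.nil_append,
        List.getElem_zipIdx, Nat.zero_add]
      rw [hak]
      simp
    rw [htake]
    simp only [pvBLoop]
    -- invariants after this step
    have hcls : ((pvAnnotate 0 0 cs)[k]'hka).1 = cs[k] := by rw [hak]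
    have hv21 : ((pvAnnotate 0 0 cs)[k]'hka).2.1 = 0 + (pvOff (cs.take k)).1 := by rw [hak]
    have hv22 : ((pvAnnotate 0 0 cs)[k]'hka).2.2 = 0 + (pvOff (cs.take k)).2 := by rw [hak]
    have invL' : pvStInv (pvAnnotate 0 0 cs) 'L' k
        (if cs[k] = 'L' then pvPush k (0 + (pvOff (cs.take k)).2) stL else stL) := by
      by_cases hch : cs[k] = 'L'
      · rw [if_pos hch]
        have hc : ((pvAnnotate 0 0 cs)[k]'hka).1 = 'L' := by rw [hcls]; exact hch
        have := pvPush_inv (pvAnnotate 0 0 cs) 'L' k stL hL hka hc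
        rwa [pvVal_L, hv22] at this
      · rw [if_neg hch]
        exact pvSkip_inv _ _ _ _ hL (fun _ => by rw [hcls]; exact hch)
    have invR' : pvStInv (pvAnnotate 0 0 cs) 'R' k
        (if cs[k] = 'R' then pvPush k (-(0 + (pvOff (cs.take k)).2)) stR else stR) := by
      by_cases hch : cs[k] = 'R'
      · rw [if_pos hch]
        have hc : ((pvAnnotate 0 0 cs)[k]'hka).1 = 'R' := by rw [hcls]; exact hch
        have := pvPush_inv (pvAnnotate 0 0 cs) 'R' k stR hR hka hc
        rwa [pvVal_R, hv22] at this
      · rw [if_neg hch]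
        exact pvSkip_inv _ _ _ _ hR (fun _ => by rw [hcls]; exact hch)
    have invU' : pvStInv (pvAnnotate 0 0 cs) 'U' k
        (if cs[k] = 'U' then pvPush k (0 + (pvOff (cs.take k)).1) stU else stU) := by
      by_cases hch : cs[k] = 'U'
      · rw [if_pos hch]
        have hc : ((pvAnnotate 0 0 cs)[k]'hka).1 = 'U' := by rw [hcls]; exact hch
        have := pvPush_inv (pvAnnotate 0 0 cs) 'U' k stU hU hka hc
        rwa [pvVal_U, hv21] at this
      · rw [if_neg hch]
        exact pvSkip_inv _ _ _ _ hU (fun _ => by rw [hcls]; exact hch)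
    have invD' : pvStInv (pvAnnotate 0 0 cs) 'D' k
        (if cs[k] = 'D' then pvPush k (-(0 + (pvOff (cs.take k)).1)) stD else stD) := by
      by_cases hch : cs[k] = 'D'
      · rw [if_pos hch]
        have hc : ((pvAnnotate 0 0 cs)[k]'hka).1 = 'D' := by rw [hcls]; exact hch
        have := pvPush_inv (pvAnnotate 0 0 cs) 'D' k stD hD hka hc
        rwa [pvVal_D, hv21] at this
      · rw [if_neg hch]
        exact pvSkip_inv _ _ _ _ hD (fun _ => by rw [hcls]; exact hch)
    obtain ⟨hb1, hb2, hb3, hb4⟩ := hB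
    have invB' : pvBadInv (pvAnnotate 0 0 cs) k
        (if cs[k] = 'L' ∨ cs[k] = 'R' ∨ cs[k] = 'U' ∨ cs[k] = 'D' then bad else k) := by
      by_cases hmv : cs[k] = 'L' ∨ cs[k] = 'R' ∨ cs[k] = 'U' ∨ cs[k] = 'D'
      · rw [if_pos hmv]
        refine ⟨by omega, hb2, ?_, hb4⟩
        intro j hj hkj hjb
        rcases Nat.eq_or_lt_of_le hkj with rfl | hlt
        · simpa [pvIsMove, hcls] using hmv
        · exact hb3 j hj (by omega) hjb
      · rw [if_neg hmv]
        refine ⟨le_refl k, by omega, ?_, ?_⟩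
        · intro j hj hkj hjb; omega
        · intro _
          simpa [pvIsMove, hcls] using hmv
    have hstep := pvStep_eq n r0 c0 (pvAnnotate 0 0 cs) k hka
      (0 + (pvOff (cs.take k)).1) (0 + (pvOff (cs.take k)).2) hv21.symm hv22.symm
      _ _ _ _ _ invL' invR' invU' invD' invB'
    rw [hstep]
    rw [ih _ _ _ _ _ _ (by omega) invL' invR' invU' invD' invB']
    have hFk : pvF n r0 c0 cs k
        = ((pvAnnotate 0 0 cs).drop k).findIdx
            (pvBlk n (r0 - (0 + (pvOff (cs.take k)).1)) (c0 - (0 + (pvOff (cs.take k)).2))) := by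
      simp [pvF]
    rw [← hFk]
    have : ((k : Int) + (pvF n r0 c0 cs k : Int)) - (k : Int) = (pvF n r0 c0 cs k : Int) := by ring
    rw [show ((k + pvF n r0 c0 cs k : Nat) : Int) - (k : Int) = (pvF n r0 c0 cs k : Int) by
      push_cast; ring]
    rw [List.range_succ]
    simp

-- ===== VERDICT (by name: the statement is the Claim_ definition above) =====
theorem executeInstructions_spec : Claim_equal_executeInstructions := by
  intro n startPos s _ _
  unfold Spec_executeInstructions executeInstructions executeInstructions_alt
  set cs := s.toList with hcs
  set r0 := (PySem.List.pyGet? startPos 0).getD 0 with hr0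
  set c0 := (PySem.List.pyGet? startPos 1).getD 0 with hc0
  dsimp only
  have hzlen : (pvAnnotate 0 0 cs).zipIdx.length = cs.length := by
    rw [List.length_zipIdx, pvAnnotate_length]
  have hrev : (pvAnnotate 0 0 cs).zipIdx.reverse
      = ((pvAnnotate 0 0 cs).zipIdx.take cs.length).reverse := by
    rw [← hzlen, List.take_length]
  rw [hrev]
  have hemp : ∀ c : Char, pvStInv (pvAnnotate 0 0 cs) c cs.length [] := by
    intro c
    refine ⟨fun q hq => absurd hq (List.not_mem_nil), List.Pairwise.nil, ?_⟩
    intro j hj hmj _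
    rw [pvAnnotate_length] at hj
    omega
  have hbad : pvBadInv (pvAnnotate 0 0 cs) cs.length cs.length := by
    refine ⟨le_refl _, by rw [pvAnnotate_length], ?_, ?_⟩
    · intro j hj hkj hjb; omega
    · intro h
      rw [pvAnnotate_length] at h
      omega
  rw [pvLoop_eq n r0 c0 cs cs.length [] [] [] [] cs.length [] (le_refl _)
    (hemp 'L') (hemp 'R') (hemp 'U') (hemp 'D') hbad]
  rw [List.append_nil]
  apply List.map_congr_left
  intro i hi
  have him : i < cs.length := List.mem_range.mp hi
  have h1 := pvAInner_eq n (r0 - (pvOff (cs.take i)).1) (c0 - (pvOff (cs.take i)).2)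
    (cs.drop i) (pvOff (cs.take i)).1 (pvOff (cs.take i)).2 0
  have e1 : r0 - (pvOff (cs.take i)).1 + (pvOff (cs.take i)).1 = r0 := by ring
  have e2 : c0 - (pvOff (cs.take i)).2 + (pvOff (cs.take i)).2 = c0 := by ring
  rw [e1, e2] at h1
  rw [h1]
  have hdrop := pvAnnotate_drop i cs 0 0
  rw [zero_add, zero_add] at hdrop
  rw [← hdrop]
  simp [pvF]
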